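-- pv_equiv track=rewrite | github.com/yustero/csb | programs/three_state/interaction_matrices.py | not_teamlike_interactions
-- ===== SOURCE A (Python) =====
-- def not_teamlike_interactions(int_mats, t1,adj):
--     #int_mats is a list of interaction matrices
--     #t2 is assumed to be n-t1
--     n=len(adj)
--     nfrust=[]
--
--     for k in int_mats:
--         frust1=0
--         frust2=0
--         for i in range(0,n):
--             for j in range(0,n):
--                 if i<t1 and j<t1 :
--                     if k[i][j] == -1:
--                         frust1+=1
--                 if i>=t1 and j<t1:
--                     if k[i][j]==-1:
--                         frust1+=1
--
--                 if j>=t1 and i<t1: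
--                     if k[i][j]==1:
--                         frust1+=1
--                 if i>=t1 and j>= t1:
--                     if k[i][j]==1:
--                         frust1+=1
--
--         for i in range(0,n):
--             for j in range(0,n):
--                 if i<t1 and j<t1 :
--                     if k[i][j] == 1:
--                         frust2+=1
--                 if i>=t1 and j<t1:
--                     if k[i][j]==1:
--                         frust2+=1
--
--                 if j>=t1 and i<t1:
--                     if k[i][j]==-1:
--                         frust2+=1
--                 if i>=t1 and j>= t1:
--                     if k[i][j]==-1:
--                         frust2+=1
--
--
--         nfrust.append(min(frust1,frust2))
--     return(nfrust)
-- ===== SOURCE B (Python) =====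
-- def not_teamlike_interactions(int_mats, t1, adj):
--     # One pass per matrix: count frust1 directly (entries -1 in columns j<t1,
--     # entries +1 in columns j>=t1) together with the total s of entries in
--     # {-1,1}; frust2 = s - frust1, so append min(frust1, s - frust1).
--     n = len(adj)
--     nfrust = []
--     for k in int_mats:
--         f1 = 0
--         s = 0
--         for i in range(n):
--             row = k[i]
--             for j in range(n):
--                 v = row[j]
--                 if v == -1 or v == 1:
--                     s += 1
--                     if (v == -1) == (j < t1):
--                         f1 += 1
--         nfrust.append(min(f1, s - f1))
--     return nfrust
-- ===== Notes on version B (the rewrite author's own statement) =====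
-- stated objective: alternative
-- what changed: Replaces A's two separate block-case double loops per matrix (frust1 and frust2 each via four i/t1,j/t1 case tests) by a single pass that tallies frust1 (sign vs column side) together with the total s of entries in {-1,1}, then returns min(frust1, s - frust1) using the identity frust1 + frust2 = s.
import Mathlib
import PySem

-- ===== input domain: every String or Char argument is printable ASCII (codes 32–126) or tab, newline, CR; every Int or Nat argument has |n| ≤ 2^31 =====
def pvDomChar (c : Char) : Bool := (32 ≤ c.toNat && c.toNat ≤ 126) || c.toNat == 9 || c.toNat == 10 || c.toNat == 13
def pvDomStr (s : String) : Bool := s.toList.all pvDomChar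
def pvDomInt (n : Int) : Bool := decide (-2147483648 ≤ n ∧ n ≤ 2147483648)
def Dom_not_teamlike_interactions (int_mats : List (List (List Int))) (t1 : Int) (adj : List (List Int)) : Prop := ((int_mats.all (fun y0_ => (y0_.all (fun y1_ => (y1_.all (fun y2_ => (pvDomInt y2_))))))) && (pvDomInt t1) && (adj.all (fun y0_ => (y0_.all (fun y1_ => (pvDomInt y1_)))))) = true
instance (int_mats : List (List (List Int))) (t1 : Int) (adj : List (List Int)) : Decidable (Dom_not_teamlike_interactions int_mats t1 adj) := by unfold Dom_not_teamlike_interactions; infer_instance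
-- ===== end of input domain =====

-- B replaces A's two separate block-counting double loops per matrix by one pass that
-- tallies frust1 and the total s of ±1 entries, using frust2 = s - frust1 (alternative decomposition).


-- ===== PORT A =====
-- k[i][j] on an in-range index (guaranteed by Pre_): default 0 is never used inside Pre_.
def pvCell (k : List (List Int)) (i j : Int) : Int :=
  PySem.List.pyGetD (PySem.List.pyGetD k i []) j 0

def not_teamlike_interactions (int_mats : List (List (List Int))) (t1 : Int) (adj : List (List Int)) : List Int :=
  let n : Int := adj.length
  int_mats.foldl (fun nfrust k =>
    let frust1 : Int := (PySem.List.pyRange 0 n 1).foldl (fun frust1 i =>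
      (PySem.List.pyRange 0 n 1).foldl (fun frust1 j =>
        let frust1 := if i < t1 ∧ j < t1 then (if pvCell k i j = -1 then frust1 + 1 else frust1) else frust1
        let frust1 := if t1 ≤ i ∧ j < t1 then (if pvCell k i j = -1 then frust1 + 1 else frust1) else frust1
        let frust1 := if t1 ≤ j ∧ i < t1 then (if pvCell k i j = 1 then frust1 + 1 else frust1) else frust1
        let frust1 := if t1 ≤ i ∧ t1 ≤ j then (if pvCell k i j = 1 then frust1 + 1 else frust1) else frust1
        frust1) frust1) 0
    let frust2 : Int := (PySem.List.pyRange 0 n 1).foldl (fun frust2 i =>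
      (PySem.List.pyRange 0 n 1).foldl (fun frust2 j =>
        let frust2 := if i < t1 ∧ j < t1 then (if pvCell k i j = 1 then frust2 + 1 else frust2) else frust2
        let frust2 := if t1 ≤ i ∧ j < t1 then (if pvCell k i j = 1 then frust2 + 1 else frust2) else frust2
        let frust2 := if t1 ≤ j ∧ i < t1 then (if pvCell k i j = -1 then frust2 + 1 else frust2) else frust2
        let frust2 := if t1 ≤ i ∧ t1 ≤ j then (if pvCell k i j = -1 then frust2 + 1 else frust2) else frust2
        frust2) frust2) 0
    nfrust ++ [min frust1 frust2]) []

-- ===== PORT B =====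
def not_teamlike_interactions_alt (int_mats : List (List (List Int))) (t1 : Int) (adj : List (List Int)) : List Int :=
  let n : Int := adj.length
  int_mats.foldl (fun nfrust k =>
    let p : Int × Int := (PySem.List.pyRange 0 n 1).foldl (fun p i =>
      let row := PySem.List.pyGetD k i []
      (PySem.List.pyRange 0 n 1).foldl (fun p j =>
        let v := PySem.List.pyGetD row j 0
        if v = -1 ∨ v = 1 then
          (if (v = -1) ↔ (j < t1) then (p.1 + 1, p.2 + 1) else (p.1, p.2 + 1))
        else p) p) (0, 0)
    nfrust ++ [min p.1 (p.2 - p.1)]) []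

-- ===== PRECONDITION & SPEC =====
-- Pre_ excludes exactly the inputs on which Python A raises IndexError: some matrix has
-- fewer than len(adj) rows, or one of its first len(adj) rows has fewer than len(adj) entries.
def Pre_not_teamlike_interactions (int_mats : List (List (List Int))) (t1 : Int) (adj : List (List Int)) : Prop :=
  ∀ k ∈ int_mats, adj.length ≤ k.length ∧ ∀ row ∈ k.take adj.length, adj.length ≤ row.length
instance (int_mats : List (List (List Int))) (t1 : Int) (adj : List (List Int)) : Decidable (Pre_not_teamlike_interactions int_mats t1 adj) := by unfold Pre_not_teamlike_interactions; infer_instance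

def pvWitness_not_teamlike_interactions : List (List (List Int)) × Int × List (List Int) :=
  ([[[1, -1], [-1, 0]], [[0, 0], [1, 1]]], 1, [[0, 1], [1, 0]])

def Spec_not_teamlike_interactions (int_mats : List (List (List Int))) (t1 : Int) (adj : List (List Int)) (out : List Int) : Prop := out = not_teamlike_interactions_alt int_mats t1 adj
instance (int_mats : List (List (List Int))) (t1 : Int) (adj : List (List Int)) (out : List Int) : Decidable (Spec_not_teamlike_interactions int_mats t1 adj out) := by unfold Spec_not_teamlike_interactions; infer_instance

-- ===== CLAIM (what is proved, stated in full; the proofs are below) =====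
def Claim_equal_not_teamlike_interactions : Prop := ∀ (int_mats : List (List (List Int))) (t1 : Int) (adj : List (List Int)), Dom_not_teamlike_interactions int_mats t1 adj → Pre_not_teamlike_interactions int_mats t1 adj → Spec_not_teamlike_interactions int_mats t1 adj (not_teamlike_interactions int_mats t1 adj)

-- ===== LEMMAS AND PROOFS =====

-- cell contributions: pvC1 = A's frust1 increment, pvC2 = A's frust2 increment, pvCS = "entry is +-1"
def pvC1 (t1 : Int) (k : List (List Int)) (i j : Int) : Int :=
  if j < t1 then (if pvCell k i j = -1 then 1 else 0) else (if pvCell k i j = 1 then 1 else 0)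
def pvC2 (t1 : Int) (k : List (List Int)) (i j : Int) : Int :=
  if j < t1 then (if pvCell k i j = 1 then 1 else 0) else (if pvCell k i j = -1 then 1 else 0)
def pvCS (k : List (List Int)) (i j : Int) : Int :=
  if pvCell k i j = -1 ∨ pvCell k i j = 1 then 1 else 0

-- a fold whose step adds g x is init + the sum of g
lemma pv_foldl_body {α : Type} (f : Int → α → Int) (g : α → Int) (L : List α)
    (h : ∀ a x, x ∈ L → f a x = a + g x) : ∀ a, L.foldl f a = a + (L.map g).sum := by
  induction L with
  | nil => intro a; simp
  | cons x l ih =>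
    intro a
    simp only [List.foldl_cons, List.map_cons, List.sum_cons]
    rw [h a x (by simp), ih (fun a y hy => h a y (by simp [hy]))]
    ring

-- a fold with two independent additive accumulators is a pair of sums
lemma pv_foldl_pair {α : Type} (f : Int × Int → α → Int × Int) (g1 g2 : α → Int) (L : List α)
    (h : ∀ p x, x ∈ L → f p x = (p.1 + g1 x, p.2 + g2 x)) :
    ∀ p, L.foldl f p = (p.1 + (L.map g1).sum, p.2 + (L.map g2).sum) := by
  induction L with
  | nil => intro p; simp
  | cons x l ih =>
    intro p
    simp only [List.foldl_cons, List.map_cons, List.sum_cons]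
    rw [h p x (by simp), ih (fun p y hy => h p y (by simp [hy]))]
    simp only [Prod.mk.injEq]
    constructor <;> ring

lemma pvC_split (t1 : Int) (k : List (List Int)) (i j : Int) :
    pvC1 t1 k i j + pvC2 t1 k i j = pvCS k i j := by
  unfold pvC1 pvC2 pvCS; split_ifs <;> omega

lemma pv_sum_add (L : List Int) (f g : Int → Int) :
    (L.map f).sum + (L.map g).sum = (L.map (fun x => f x + g x)).sum := by
  induction L with
  | nil => simp
  | cons a l ih => simp only [List.map_cons, List.sum_cons]; omega

-- A's frust1 loop is the double sum of pvC1
lemma pvA_loop1 (t1 : Int) (k : List (List Int)) (n : Int) :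
    (PySem.List.pyRange 0 n 1).foldl (fun frust1 i =>
      (PySem.List.pyRange 0 n 1).foldl (fun frust1 j =>
        let f1 := if i < t1 ∧ j < t1 then (if pvCell k i j = -1 then frust1 + 1 else frust1) else frust1
        let f2 := if t1 ≤ i ∧ j < t1 then (if pvCell k i j = -1 then f1 + 1 else f1) else f1
        let f3 := if t1 ≤ j ∧ i < t1 then (if pvCell k i j = 1 then f2 + 1 else f2) else f2
        if t1 ≤ i ∧ t1 ≤ j then (if pvCell k i j = 1 then f3 + 1 else f3) else f3) frust1) 0
    = ((PySem.List.pyRange 0 n 1).map (fun i => ((PySem.List.pyRange 0 n 1).map (pvC1 t1 k i)).sum)).sum := by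
  have inner : ∀ (i : Int) (a : Int),
      (PySem.List.pyRange 0 n 1).foldl (fun frust1 j =>
        let f1 := if i < t1 ∧ j < t1 then (if pvCell k i j = -1 then frust1 + 1 else frust1) else frust1
        let f2 := if t1 ≤ i ∧ j < t1 then (if pvCell k i j = -1 then f1 + 1 else f1) else f1
        let f3 := if t1 ≤ j ∧ i < t1 then (if pvCell k i j = 1 then f2 + 1 else f2) else f2
        if t1 ≤ i ∧ t1 ≤ j then (if pvCell k i j = 1 then f3 + 1 else f3) else f3) a
      = a + ((PySem.List.pyRange 0 n 1).map (pvC1 t1 k i)).sum := by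
    intro i
    exact pv_foldl_body _ _ _ (by
      intro a j _
      simp only [pvC1]
      split_ifs <;> omega)
  simp only [inner]
  rw [pv_foldl_body _ _ _ (fun a i _ => rfl)]
  omega

-- A's frust2 loop is the double sum of pvC2
lemma pvA_loop2 (t1 : Int) (k : List (List Int)) (n : Int) :
    (PySem.List.pyRange 0 n 1).foldl (fun frust2 i =>
      (PySem.List.pyRange 0 n 1).foldl (fun frust2 j =>
        let f1 := if i < t1 ∧ j < t1 then (if pvCell k i j = 1 then frust2 + 1 else frust2) else frust2
        let f2 := if t1 ≤ i ∧ j < t1 then (if pvCell k i j = 1 then f1 + 1 else f1) else f1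
        let f3 := if t1 ≤ j ∧ i < t1 then (if pvCell k i j = -1 then f2 + 1 else f2) else f2
        if t1 ≤ i ∧ t1 ≤ j then (if pvCell k i j = -1 then f3 + 1 else f3) else f3) frust2) 0
    = ((PySem.List.pyRange 0 n 1).map (fun i => ((PySem.List.pyRange 0 n 1).map (pvC2 t1 k i)).sum)).sum := by
  have inner : ∀ (i : Int) (a : Int),
      (PySem.List.pyRange 0 n 1).foldl (fun frust2 j =>
        let f1 := if i < t1 ∧ j < t1 then (if pvCell k i j = 1 then frust2 + 1 else frust2) else frust2
        let f2 := if t1 ≤ i ∧ j < t1 then (if pvCell k i j = 1 then f1 + 1 else f1) else f1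
        let f3 := if t1 ≤ j ∧ i < t1 then (if pvCell k i j = -1 then f2 + 1 else f2) else f2
        if t1 ≤ i ∧ t1 ≤ j then (if pvCell k i j = -1 then f3 + 1 else f3) else f3) a
      = a + ((PySem.List.pyRange 0 n 1).map (pvC2 t1 k i)).sum := by
    intro i
    exact pv_foldl_body _ _ _ (by
      intro a j _
      simp only [pvC2]
      split_ifs <;> omega)
  simp only [inner]
  rw [pv_foldl_body _ _ _ (fun a i _ => rfl)]
  omega

-- B's paired loop computes (double sum of pvC1, double sum of pvCS)
lemma pvB_loop (t1 : Int) (k : List (List Int)) (n : Int) :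
    (PySem.List.pyRange 0 n 1).foldl (fun p i =>
      let row := PySem.List.pyGetD k i []
      (PySem.List.pyRange 0 n 1).foldl (fun (p : Int × Int) j =>
        let v := PySem.List.pyGetD row j 0
        if v = -1 ∨ v = 1 then
          (if (v = -1) ↔ (j < t1) then (p.1 + 1, p.2 + 1) else (p.1, p.2 + 1))
        else p) p) ((0 : Int), (0 : Int))
    = (((PySem.List.pyRange 0 n 1).map (fun i => ((PySem.List.pyRange 0 n 1).map (pvC1 t1 k i)).sum)).sum,
       ((PySem.List.pyRange 0 n 1).map (fun i => ((PySem.List.pyRange 0 n 1).map (pvCS k i)).sum)).sum) := by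
  have inner : ∀ (i : Int) (p : Int × Int),
      (PySem.List.pyRange 0 n 1).foldl (fun (p : Int × Int) j =>
        let v := PySem.List.pyGetD (PySem.List.pyGetD k i []) j 0
        if v = -1 ∨ v = 1 then
          (if (v = -1) ↔ (j < t1) then (p.1 + 1, p.2 + 1) else (p.1, p.2 + 1))
        else p) p
      = (p.1 + ((PySem.List.pyRange 0 n 1).map (pvC1 t1 k i)).sum,
         p.2 + ((PySem.List.pyRange 0 n 1).map (pvCS k i)).sum) := by
    intro i
    exact pv_foldl_pair _ _ _ _ (by
      intro p j _
      simp only [pvC1, pvCS, pvCell]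
      split_ifs <;> simp_all)
  simp only [inner]
  rw [pv_foldl_pair _ _ _ _ (fun p i _ => rfl)]
  simp

-- ===== VERDICT (by name: the statement is the Claim_ definition above) =====
theorem not_teamlike_interactions_spec : Claim_equal_not_teamlike_interactions := by
  intro int_mats t1 adj _ _
  unfold Spec_not_teamlike_interactions not_teamlike_interactions not_teamlike_interactions_alt
  simp only
  congr 1
  funext nfrust k
  rw [pvA_loop1, pvA_loop2, pvB_loop]
  have h : ((PySem.List.pyRange 0 (adj.length : Int) 1).map (fun i => ((PySem.List.pyRange 0 (adj.length : Int) 1).map (pvC1 t1 k i)).sum)).sum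
      + ((PySem.List.pyRange 0 (adj.length : Int) 1).map (fun i => ((PySem.List.pyRange 0 (adj.length : Int) 1).map (pvC2 t1 k i)).sum)).sum
      = ((PySem.List.pyRange 0 (adj.length : Int) 1).map (fun i => ((PySem.List.pyRange 0 (adj.length : Int) 1).map (pvCS k i)).sum)).sum := by
    rw [pv_sum_add]
    apply congrArg
    apply List.map_congr_left
    intro i _
    rw [pv_sum_add]
    apply congrArg
    apply List.map_congr_left
    intro j _
    exact pvC_split t1 k i j
  congr 2
  omega
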